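-- pv_equiv track=rewrite | github.com/pypi-data/pypi-mirror-403 | packages/maptasker/maptasker-10.0.5.tar.gz/maptasker-10.0.5/maptasker/src/profiles.py | delete_non_blank_before_equals
-- ===== SOURCE A (Python) =====
-- def delete_non_blank_before_equals(text: str) -> str:
--     """
--     Searches a string for '=', and for each match, deletes the non-blank
--     characters immediately preceding it.
--
--     Args:
--         text (str): The input string to process.
--
--     Returns:
--         str: The modified string with non-blank characters before '=' removed.
--     """
--     modified_text = list(text)  # Convert to a list for easier modification
--     indices_to_delete = set()
--
--     for i, char in enumerate(text):
--         if char == "=":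
--             indices_to_delete.add(i)  # Mark the '=' for deletion
--             # Look backwards for non-blank characters to delete
--             j = i - 1
--             while j >= 0 and modified_text[j] != " " and modified_text[j] != "=":
--                 indices_to_delete.add(j)
--                 j -= 1
--
--     # Create a new list excluding the characters at the marked indices
--     result = [char for i, char in enumerate(modified_text) if i not in indices_to_delete]
--     return "".join(result)
-- ===== SOURCE B (Python) =====
-- def delete_non_blank_before_equals(text: str) -> str:
--     """Single forward pass: build the output as a stack; an '=' is dropped and
--     pops the run of non-blank, non-'=' characters right before it."""
--     result = []
--     for char in text:
--         if char == "=":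
--             while result and result[-1] != " " and result[-1] != "=":
--                 result.pop()
--         else:
--             result.append(char)
--     return "".join(result)
-- ===== Notes on version B (the rewrite author's own statement) =====
-- stated objective: faster
-- what changed: Replaced A's two-pass scheme (mark deletion indices in a set by scanning backward from each '=' sign, then filter by index) with a single forward pass that keeps the output as a stack and, on each '=' sign, pops the preceding run of non-blank non-'=' characters.
import Mathlib
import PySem

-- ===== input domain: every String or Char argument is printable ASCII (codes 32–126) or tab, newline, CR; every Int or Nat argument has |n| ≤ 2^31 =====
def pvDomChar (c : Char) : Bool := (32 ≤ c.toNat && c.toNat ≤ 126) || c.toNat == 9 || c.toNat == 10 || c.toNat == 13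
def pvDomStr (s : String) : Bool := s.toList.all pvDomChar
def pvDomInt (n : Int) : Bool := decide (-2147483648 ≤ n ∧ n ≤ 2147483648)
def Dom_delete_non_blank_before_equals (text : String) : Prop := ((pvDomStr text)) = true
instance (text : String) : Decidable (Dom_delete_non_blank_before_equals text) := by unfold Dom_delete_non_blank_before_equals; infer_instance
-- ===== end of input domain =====

-- B replaces A's two passes (mark deletion indices in a set by scanning backward
-- from each '=', then filter) by one forward pass over a result stack; the timing
-- run measured B faster (each character is pushed and popped at most once).

-- ===== PORT A =====
-- A's inner `while` loop: `j1` encodes Python's j as j1 = j + 1 (so `j1 = 0` is the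
-- `j >= 0` exit).  `modified_text[j]` is always in range when read here (j < i < length),
-- so `List.getD` is exact.
def pvBackA (cs : List Char) : Nat → PySem.Set Int → PySem.Set Int
  | 0, s => s
  | j + 1, s =>
    if cs.getD j ' ' ≠ ' ' ∧ cs.getD j ' ' ≠ '=' then
      pvBackA cs j (PySem.Set.add s (j : Int))
    else s

def delete_non_blank_before_equals (text : String) : String :=
  let modified_text := text.toList
  let indices_to_delete :=
    (PySem.List.enumerate text.toList 0).foldl
      (fun s ic =>
        if ic.2 = '=' then
          -- add i, then look backwards starting at j = i - 1 (pvBackA's argument is j + 1 = i)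
          pvBackA modified_text ic.1.toNat (PySem.Set.add s ic.1)
        else s)
      PySem.Set.empty
  String.mk (((PySem.List.enumerate modified_text 0).filter
      (fun ic => !(PySem.Set.contains indices_to_delete ic.1))).map (·.2))

-- ===== PORT B =====
-- B's inner `while result and result[-1] != " " and result[-1] != "=":  result.pop()`;
-- the stack is kept reversed (top of stack = head of list).
def pvPopB (result : List Char) : List Char :=
  match result with
  | [] => []
  | top :: rest => if top ≠ ' ' ∧ top ≠ '=' then pvPopB rest else top :: rest

def delete_non_blank_before_equals_alt (text : String) : String :=
  String.mk ((text.toList.foldl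
      (fun result char => if char = '=' then pvPopB result else char :: result)
      []).reverse)

-- ===== PRECONDITION & SPEC =====
def Spec_delete_non_blank_before_equals (text : String) (out : String) : Prop := out = delete_non_blank_before_equals_alt text
instance (text : String) (out : String) : Decidable (Spec_delete_non_blank_before_equals text out) := by unfold Spec_delete_non_blank_before_equals; infer_instance

-- ===== CLAIM (what is proved, stated in full; the proofs are below) =====
def Claim_equal_delete_non_blank_before_equals : Prop := ∀ (text : String), Dom_delete_non_blank_before_equals text → Spec_delete_non_blank_before_equals text (delete_non_blank_before_equals text)

-- ===== LEMMAS AND PROOFS =====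

-- A character at position k is deleted iff, from position k onward, an '=' is reached
-- before any ' ' (an '=' itself included).  `pvKilled l` decides this for the suffix `l`.
def pvKilled : List Char → Bool
  | [] => false
  | c :: r => if c = '=' then true else if c = ' ' then false else pvKilled r

-- The common intended result: keep exactly the non-killed positions.
def pvSpec : List Char → List Char
  | [] => []
  | c :: r => if pvKilled (c :: r) then pvSpec r else c :: pvSpec r

-- "run of deletable characters" test used by A's backward scan
def pvNB (c : Char) : Bool := c ≠ ' ' && c ≠ '='

-- ---------- B = pvSpec ----------

theorem pvPopB_idem (l : List Char) : pvPopB (pvPopB l) = pvPopB l := by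
  induction l with
  | nil => rfl
  | cons c r ih =>
    by_cases h : c ≠ ' ' ∧ c ≠ '='
    · simp [pvPopB, h, ih]
    · simp [pvPopB, h]

theorem pvB_inv (cs : List Char) : ∀ acc : List Char,
    cs.foldl (fun result char => if char = '=' then pvPopB result else char :: result) acc
      = (pvSpec cs).reverse ++ (if pvKilled cs then pvPopB acc else acc) := by
  induction cs with
  | nil => intro acc; simp [pvSpec, pvKilled]
  | cons c r ih =>
    intro acc
    by_cases hc : c = '='
    · subst hc
      simp only [List.foldl_cons]
      rw [if_pos trivial, ih (pvPopB acc)]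
      by_cases hk : pvKilled r = true <;>
        simp [pvSpec, pvKilled, hk, pvPopB_idem]
    · by_cases hs : c = ' '
      · subst hs
        simp only [List.foldl_cons, if_neg hc, ih (' ' :: acc)]
        have hpop : pvPopB (' ' :: acc) = ' ' :: acc := by simp [pvPopB]
        simp [pvKilled, pvSpec, hpop, hc]
      · simp only [List.foldl_cons, if_neg hc, ih (c :: acc)]
        have hpop : pvPopB (c :: acc) = pvPopB acc := by simp [pvPopB, hc, hs]
        by_cases hk : pvKilled r = true
        · simp [pvKilled, pvSpec, hc, hs, hk, hpop]
        · simp [pvKilled, pvSpec, hc, hs, hk]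

theorem pvB_eq_spec (text : String) :
    delete_non_blank_before_equals_alt text = String.mk (pvSpec text.toList) := by
  unfold delete_non_blank_before_equals_alt
  rw [pvB_inv text.toList []]
  split <;> simp [pvPopB]

-- ---------- A = pvSpec ----------

theorem pvBackA_mem (cs : List Char) : ∀ (j : Nat), j ≤ cs.length → ∀ (s : PySem.Set Int) (k : Nat),
    ((k : Int) ∈ pvBackA cs j s) ↔
      ((k : Int) ∈ s ∨ (k < j ∧ ((cs.take j).drop k).all pvNB = true)) := by
  intro j
  induction j with
  | zero => intro _ s k; simp [pvBackA]
  | succ j ih =>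
    intro hj s k
    have hjlen : j < cs.length := hj
    have hget : cs.getD j ' ' = cs[j] := List.getD_eq_getElem cs ' ' hjlen
    have htake : cs.take (j + 1) = cs.take j ++ [cs[j]] := by
      rw [List.take_add_one]; simp [List.getElem?_eq_getElem hjlen]
    have hlen : (cs.take j).length = j := by simp [le_of_lt hjlen]
    by_cases hp : cs.getD j ' ' ≠ ' ' ∧ cs.getD j ' ' ≠ '='
    · have hp' : cs[j] ≠ ' ' ∧ cs[j] ≠ '=' := by rw [← hget]; exact hp
      rw [pvBackA, if_pos hp, ih (le_of_lt hjlen) (PySem.Set.add s (j : Int)) k,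
        PySem.Set.mem_add]
      constructor
      · rintro ((h | h) | ⟨hk, hall⟩)
        · exact Or.inl h
        · have hkj : k = j := by exact_mod_cast h
          refine Or.inr ⟨by omega, ?_⟩
          rw [htake, List.drop_append_of_le_length (by omega),
            List.drop_eq_nil_of_le (by omega)]
          simp [pvNB, hp'.1, hp'.2]
        · refine Or.inr ⟨by omega, ?_⟩
          rw [htake, List.drop_append_of_le_length (by omega), List.all_append]
          simp [hall, pvNB, hp'.1, hp'.2]
      · rintro (h | ⟨hk, hall⟩)
        · exact Or.inl (Or.inl h)
        · rcases Nat.lt_succ_iff_lt_or_eq.mp hk with hlt | heq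
          · refine Or.inr ⟨hlt, ?_⟩
            rw [htake, List.drop_append_of_le_length (by omega),
              List.all_append] at hall
            exact ((Bool.and_eq_true _ _).mp hall).1
          · exact Or.inl (Or.inr (by exact_mod_cast heq))
    · rw [pvBackA, if_neg hp]
      have hp' : ¬(cs[j] ≠ ' ' ∧ cs[j] ≠ '=') := by rw [← hget]; exact hp
      constructor
      · exact Or.inl
      · rintro (h | ⟨hk, hall⟩)
        · exact h
        · exfalso
          rcases Nat.lt_succ_iff_lt_or_eq.mp hk with hlt | heq
          · rw [htake, List.drop_append_of_le_length (by omega),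
              List.all_append] at hall
            have h2 := ((Bool.and_eq_true _ _).mp hall).2
            simp [pvNB] at h2
            exact hp' ⟨h2.1, h2.2⟩
          · rw [htake, List.drop_append_of_le_length (by omega),
              List.drop_eq_nil_of_le (by omega)] at hall
            simp [pvNB] at hall
            exact hp' ⟨hall.1, hall.2⟩

-- pvKilled over a one-step extension of the processed prefix
theorem pvKilled_append_ne (xs : List Char) (c : Char) (hc : c ≠ '=') :
    pvKilled (xs ++ [c]) = pvKilled xs := by
  induction xs with
  | nil => by_cases h : c = ' ' <;> simp [pvKilled, hc, h]
  | cons x r ih => by_cases h1 : x = '=' <;> by_cases h2 : x = ' ' <;> simp [pvKilled, h1, h2, ih]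

theorem pvKilled_append_eq (xs : List Char) :
    pvKilled (xs ++ ['=']) = (pvKilled xs || xs.all pvNB) := by
  induction xs with
  | nil => simp [pvKilled]
  | cons x r ih =>
    by_cases h1 : x = '=' <;> by_cases h2 : x = ' ' <;>
      simp [pvKilled, pvNB, h1, h2, ih]

-- the outer `for i, char in enumerate(text)` loop: running invariant of the index set
theorem pvFoldA_inv (cs : List Char) : ∀ (xs : List Char) (m : Nat) (s : PySem.Set Int),
    xs = cs.drop m →
    (∀ k : Nat, ((k : Int) ∈ s) ↔ pvKilled ((cs.take m).drop k) = true) →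
    ∀ k : Nat,
      ((k : Int) ∈ (PySem.List.enumerate xs (m : Int)).foldl
          (fun s ic => if ic.2 = '=' then pvBackA cs ic.1.toNat (PySem.Set.add s ic.1) else s) s)
        ↔ pvKilled (cs.drop k) = true := by
  intro xs
  induction xs with
  | nil =>
    intro m s hm hs k
    have hlen : cs.length ≤ m := List.drop_eq_nil_iff.mp hm.symm
    rw [PySem.List.enumerate_nil]
    simpa [List.take_of_length_le hlen] using hs k
  | cons c rest ih =>
    intro m s hm hs k
    have hmlen : m < cs.length := by
      by_contra hcon
      rw [List.drop_eq_nil_of_le (by omega)] at hm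
      exact List.cons_ne_nil _ _ hm
    have hc0 : cs[m] = c := by
      have h0 : (cs.drop m)[0]'(by rw [← hm]; simp) = c := by simp [← hm]
      simpa using h0
    have hrest : rest = cs.drop (m + 1) := by
      have := congrArg List.tail hm
      simpa [List.tail_drop] using this
    have htake : cs.take (m + 1) = cs.take m ++ [c] := by
      rw [List.take_add_one]; simp [List.getElem?_eq_getElem hmlen, hc0]
    have hlentake : (cs.take m).length = m := by simp [le_of_lt hmlen]
    have hcast : ((m : Int) + 1) = (((m + 1 : Nat)) : Int) := by push_cast; ring
    rw [PySem.List.enumerate_cons, List.foldl_cons, hcast]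
    by_cases hceq : c = '='
    · rw [show (if ((m : Int), c).2 = '=' then
            pvBackA cs ((m : Int), c).1.toNat (PySem.Set.add s ((m : Int), c).1) else s)
          = pvBackA cs ((m : Int)).toNat (PySem.Set.add s (m : Int)) from by simp [hceq]]
      apply ih (m + 1) _ hrest
      intro k'
      rw [Int.toNat_natCast, pvBackA_mem cs m (le_of_lt hmlen) _ k', PySem.Set.mem_add, hs k',
        htake, hceq]
      by_cases hkm : k' ≤ m
      · rw [List.drop_append_of_le_length (by omega), pvKilled_append_eq]
        constructor
        · rintro ((h | h) | ⟨_, hall⟩)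
          · simp [h]
          · have hk'm : k' = m := by exact_mod_cast h
            have hnil : (cs.take m).drop k' = [] := List.drop_eq_nil_of_le (by omega)
            simp [hnil]
          · simp [hall]
        · intro h
          rcases (Bool.or_eq_true _ _).mp h with h | h
          · exact Or.inl (Or.inl h)
          · rcases Nat.lt_or_ge k' m with hlt | hge
            · exact Or.inr ⟨hlt, h⟩
            · have hk'm : k' = m := by omega
              exact Or.inl (Or.inr (by exact_mod_cast hk'm))
      · have h1 : (cs.take m ++ ['=']).drop k' = [] :=
          List.drop_eq_nil_of_le (by simp [hlentake]; omega)
        have h2 : (cs.take m).drop k' = [] := List.drop_eq_nil_of_le (by omega)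
        have h3 : ¬ ((k' : Int) = (m : Int)) := by
          intro h; exact absurd (by exact_mod_cast h : k' = m) (by omega)
        simp [h1, h2, pvKilled, h3]
        omega
    · rw [show (if ((m : Int), c).2 = '=' then
            pvBackA cs ((m : Int), c).1.toNat (PySem.Set.add s ((m : Int), c).1) else s)
          = s from by simp [hceq]]
      apply ih (m + 1) _ hrest
      intro k'
      rw [hs k', htake]
      by_cases hkm : k' ≤ m
      · rw [List.drop_append_of_le_length (by omega), pvKilled_append_ne _ _ hceq]
      · have h1 : (cs.take m ++ [c]).drop k' = [] :=
          List.drop_eq_nil_of_le (by simp [hlentake]; omega)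
        have h2 : (cs.take m).drop k' = [] := List.drop_eq_nil_of_le (by omega)
        simp [h1, h2, pvKilled]

-- filter step: keeping exactly the non-killed indices yields pvSpec
theorem pvFilterA (cs : List Char) (S : PySem.Set Int)
    (hS : ∀ k : Nat, ((k : Int) ∈ S) ↔ pvKilled (cs.drop k) = true) :
    ∀ (xs : List Char) (m : Nat), xs = cs.drop m →
      ((PySem.List.enumerate xs (m : Int)).filter
          (fun ic => !(PySem.Set.contains S ic.1))).map (·.2) = pvSpec xs := by
  intro xs
  induction xs with
  | nil => intro m _; simp [PySem.List.enumerate_nil, pvSpec]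
  | cons c rest ih =>
    intro m hm
    have hrest : rest = cs.drop (m + 1) := by
      have := congrArg List.tail hm
      simpa [List.tail_drop] using this
    have hcast : ((m : Int) + 1) = (((m + 1 : Nat)) : Int) := by push_cast; ring
    have hmemk : ((m : Int) ∈ S) ↔ pvKilled (c :: rest) = true := by rw [hS m, ← hm]
    rw [PySem.List.enumerate_cons, hcast]
    by_cases hk : pvKilled (c :: rest) = true
    · rw [List.filter_cons, if_neg (by simp; exact hmemk.mpr hk), ih (m + 1) hrest]
      simp [pvSpec, hk]
    · rw [List.filter_cons, if_pos (by simp; exact fun hmm => hk (hmemk.mp hmm)),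
        List.map_cons, ih (m + 1) hrest]
      simp [pvSpec, hk]

theorem pvA_eq_spec (text : String) :
    delete_non_blank_before_equals text = String.mk (pvSpec text.toList) := by
  unfold delete_non_blank_before_equals
  have h0 : ((0 : Nat) : Int) = (0 : Int) := rfl
  have hS : ∀ k : Nat,
      ((k : Int) ∈ (PySem.List.enumerate text.toList 0).foldl
          (fun s ic => if ic.2 = '=' then
              pvBackA text.toList ic.1.toNat (PySem.Set.add s ic.1) else s)
          PySem.Set.empty) ↔ pvKilled (text.toList.drop k) = true := by
    intro k
    have := pvFoldA_inv text.toList text.toList 0 PySem.Set.empty (by simp)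
      (by intro k'; simp [PySem.Set.empty, pvKilled]) k
    simpa using this
  have := pvFilterA text.toList _ hS text.toList 0 (by simp)
  simpa using congrArg String.mk this

-- ===== VERDICT (by name: the statement is the Claim_ definition above) =====
theorem delete_non_blank_before_equals_spec : Claim_equal_delete_non_blank_before_equals := by
  intro text _
  unfold Spec_delete_non_blank_before_equals
  rw [pvA_eq_spec, pvB_eq_spec]
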